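-- pv_equiv track=rewrite | github.com/stayhungry134/data_structure | LeetCode/1_简单题/2506_统计相似字符串对的数目.py | similarPairs1
-- ===== SOURCE A (Python) =====
-- from typing import List
--
-- def similarPairs1(words: List[str]) -> int:
--     from collections import defaultdict
--     n = len(words)
--     res = 0
--     dic = defaultdict(int)
--     for word in words:
--         key = ''.join(sorted(set(word)))
--         res += dic[key]
--         dic[key] += 1
--     return res
-- ===== SOURCE B (Python) =====
-- from typing import List
--
-- def similarPairs1(words: List[str]) -> int:
--     keys = sorted(''.join(sorted(set(w))) for w in words)
--     res = 0
--     run = 0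
--     for a, b in zip(keys, keys[1:]):
--         if a == b:
--             run += 1
--             res += run
--         else:
--             run = 0
--     return res
-- ===== Notes on version B (the rewrite author's own statement) =====
-- stated objective: alternative
-- what changed: Replaces A's hashmap of pairs-seen-so-far by a sort-then-scan: sort the canonical keys so equal keys are adjacent, then one linear scan over adjacent pairs accumulates run lengths; no dictionary at all.
import Mathlib
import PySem

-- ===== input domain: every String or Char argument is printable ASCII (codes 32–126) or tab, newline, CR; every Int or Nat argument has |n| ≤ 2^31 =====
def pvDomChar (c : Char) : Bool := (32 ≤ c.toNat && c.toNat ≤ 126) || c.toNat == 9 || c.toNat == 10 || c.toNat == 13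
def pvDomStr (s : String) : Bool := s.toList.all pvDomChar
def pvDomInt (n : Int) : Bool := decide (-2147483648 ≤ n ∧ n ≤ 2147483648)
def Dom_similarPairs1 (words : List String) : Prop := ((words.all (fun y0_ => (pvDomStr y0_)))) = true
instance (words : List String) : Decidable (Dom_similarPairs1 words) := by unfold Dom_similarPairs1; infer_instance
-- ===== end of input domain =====

-- B sorts the canonical keys and counts equal adjacent runs in one scan,
-- instead of A's hashmap of pairs-seen-so-far; no dictionary at all.

-- key = ''.join(sorted(set(word)))  (shared by both Pythons)
def pvKey (w : String) : String :=
  String.ofList (PySem.List.sorted (PySem.Set.ofList w.toList) (fun c => c) false)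

-- ===== PORT A =====
def similarPairs1 (words : List String) : Int :=
  -- n = len(words) is computed but unused in A
  (words.foldl
    (fun (st : Int × PySem.Dict String Int) word =>
      let key := pvKey word
      (st.1 + st.2.getD key 0, st.2.insert key (st.2.getD key 0 + 1)))
    (0, PySem.Dict.empty)).1

-- ===== PORT B =====
def similarPairs1_alt (words : List String) : Int :=
  let keys := PySem.List.sorted (words.map pvKey) (fun k => k) false
  ((keys.zip (PySem.List.slice keys (some 1) none)).foldl
    (fun (st : Int × Int) p => if p.1 == p.2 then (st.1 + st.2 + 1, st.2 + 1) else (st.1, 0))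
    (0, 0)).1

-- ===== PRECONDITION & SPEC =====
def Spec_similarPairs1 (words : List String) (out : Int) : Prop := out = similarPairs1_alt words
instance (words : List String) (out : Int) : Decidable (Spec_similarPairs1 words out) := by unfold Spec_similarPairs1; infer_instance

-- ===== CLAIM (what is proved, stated in full; the proofs are below) =====
def Claim_equal_similarPairs1 : Prop := ∀ (words : List String), Dom_similarPairs1 words → Spec_similarPairs1 words (similarPairs1 words)

-- ===== LEMMAS AND PROOFS =====

-- number of pairs i<j with equal keys, by front-element recursion
def pvNp : List String → Int
  | [] => 0
  | k :: t => (t.count k : Int) + pvNp t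

lemma pvNp_perm {l l' : List String} (h : l.Perm l') : pvNp l = pvNp l' := by
  induction h with
  | nil => rfl
  | cons x h ih => simp [pvNp, ih, h.count_eq]
  | swap x y t =>
      rcases eq_or_ne x y with h | h
      · subst h; rfl
      · simp only [pvNp, List.count_cons]
        simp [h, h.symm]
        ring
  | trans _ _ ih1 ih2 => exact ih1.trans ih2

lemma pv_sum_ind (t : List String) (k : String) :
    (t.map (fun i => if k = i then (1 : Int) else 0)).sum = (t.count k : Int) := by
  induction t with
  | nil => simp
  | cons a t ih =>
      simp only [List.map_cons, List.sum_cons, ih, List.count_cons]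
      by_cases h : k = a
      · simp [h]; ring
      · simp [h, Ne.symm h]

lemma pv_cross_append (t : List String) (p : List String) (k : String) :
    (t.map (fun x => (((p ++ [k]).count x : Nat) : Int))).sum
      = (t.map (fun x => ((p.count x : Nat) : Int))).sum + (t.count k : Int) := by
  have hsplit : ∀ x : String, (((p ++ [k]).count x : Nat) : Int)
      = ((p.count x : Nat) : Int) + (if k = x then (1 : Int) else 0) := by
    intro x
    simp only [List.count_append, List.count_singleton']
    push_cast
    split_ifs <;> simp
  calc (t.map (fun x => (((p ++ [k]).count x : Nat) : Int))).sum
      = (t.map (fun x => ((p.count x : Nat) : Int) + (if k = x then (1 : Int) else 0))).sum := by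
        exact congrArg List.sum (List.map_congr_left (fun x _ => hsplit x))
    _ = (t.map (fun x => ((p.count x : Nat) : Int))).sum
          + (t.map (fun x => if k = x then (1 : Int) else 0)).sum := by
        rw [← List.sum_map_add]
    _ = (t.map (fun x => ((p.count x : Nat) : Int))).sum + (t.count k : Int) := by
        rw [pv_sum_ind]

-- A's loop, started on the counter of any already-seen key list p
lemma pv_loopA : ∀ (l : List String) (res : Int) (p : List String),
    (l.foldl
      (fun (st : Int × PySem.Dict String Int) k =>
        (st.1 + st.2.getD k 0, st.2.insert k (st.2.getD k 0 + 1)))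
      (res, PySem.Dict.counter p)).1
    = res + (l.map (fun x => ((p.count x : Nat) : Int))).sum + pvNp l := by
  intro l
  induction l with
  | nil => intro res p; simp [pvNp]
  | cons k t ih =>
      intro res p
      simp only [List.foldl_cons, PySem.Dict.getD_counter]
      rw [show (PySem.Dict.counter p).insert k ((p.count k : Int) + 1)
            = PySem.Dict.counter (p ++ [k]) from ?_]
      · rw [ih (res + (p.count k : Int)) (p ++ [k]), pv_cross_append]
        simp only [List.map_cons, List.sum_cons, pvNp]
        ring
      · have h1 : ∀ q : List String,
            PySem.Dict.counter q
              = q.foldl (fun (d : PySem.Dict String Int) x => d.insert x (d.getD x 0 + 1))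
                  PySem.Dict.empty :=
          fun q => (PySem.Dict.foldl_insert_getD_add_one_eq_counter q).symm
        rw [h1 (p ++ [k]), List.foldl_append, List.foldl_cons, List.foldl_nil, ← h1 p,
          PySem.Dict.getD_counter]

-- B's scan over adjacent pairs of a sorted key list
lemma pv_scanB : ∀ (t : List String) (prev : String) (res run : Int),
    (prev :: t).Pairwise (· ≤ ·) →
    (((prev :: t).zip t).foldl
      (fun (st : Int × Int) p => if p.1 == p.2 then (st.1 + st.2 + 1, st.2 + 1) else (st.1, 0))
      (res, run)).1
    = res + pvNp t + (run + 1) * (t.count prev : Int) := by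
  intro t
  induction t with
  | nil => intro prev res run _; simp [pvNp]
  | cons k t ih =>
      intro prev res run hp
      have hp' : (k :: t).Pairwise (· ≤ ·) := hp.tail
      simp only [List.zip_cons_cons, List.foldl_cons]
      by_cases hpk : prev = k
      · subst hpk
        simp only [beq_self_eq_true, if_true]
        rw [ih prev (res + run + 1) (run + 1) hp']
        simp only [pvNp, List.count_cons_self]
        push_cast
        ring
      · have hne : (prev == k) = false := by simpa using hpk
        simp only [hne, Bool.false_eq_true, if_false]
        rw [ih k res 0 hp']
        have hcount : (k :: t).count prev = 0 := by
          rw [List.count_eq_zero]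
          intro hmem
          rcases List.mem_cons.mp hmem with h | h
          · exact hpk h
          · have h1 : prev ≤ k := (List.pairwise_cons.mp hp).1 k (by simp)
            have h2 : k ≤ prev := (List.pairwise_cons.mp hp').1 prev h
            exact hpk (le_antisymm h1 h2)
        simp only [pvNp, hcount, Nat.cast_zero, mul_zero]
        ring

-- ===== VERDICT (by name: the statement is the Claim_ definition above) =====
theorem similarPairs1_spec : Claim_equal_similarPairs1 := by
  intro words _
  unfold Spec_similarPairs1 similarPairs1 similarPairs1_alt
  -- A's side: fold over words = fold over keys, started on the empty counter
  have hmap :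
      (words.foldl
        (fun (st : Int × PySem.Dict String Int) word =>
          let key := pvKey word
          (st.1 + st.2.getD key 0, st.2.insert key (st.2.getD key 0 + 1)))
        ((0 : Int), PySem.Dict.empty))
      = ((words.map pvKey).foldl
        (fun (st : Int × PySem.Dict String Int) k =>
          (st.1 + st.2.getD k 0, st.2.insert k (st.2.getD k 0 + 1)))
        ((0 : Int), PySem.Dict.empty)) := by
    rw [List.foldl_map]
  rw [hmap]
  have hempty : (PySem.Dict.empty : PySem.Dict String Int) = PySem.Dict.counter ([] : List String) := rfl
  rw [hempty, pv_loopA (words.map pvKey) 0 []]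
  simp only [List.count_nil, Nat.cast_zero, List.map_const', List.sum_replicate, smul_zero,
    add_zero, zero_add]
  -- B's side
  rw [PySem.List.slice_from_one]
  have hperm : pvNp (words.map pvKey)
      = pvNp (PySem.List.sorted (words.map pvKey) (fun k => k) false) :=
    pvNp_perm (PySem.List.sorted_perm _ _ _).symm
  rw [hperm]
  cases hs : PySem.List.sorted (words.map pvKey) (fun k => k) false with
  | nil => simp [pvNp]
  | cons m t =>
      have hpw : (m :: t).Pairwise (· ≤ ·) := by
        have := PySem.List.sorted_pairwise (words.map pvKey) (fun k => k)
        rw [hs] at this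
        exact this
      rw [show (m :: t).tail = t from rfl, pv_scanB t m 0 0 hpw]
      simp only [pvNp, zero_add, one_mul]
      ring
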